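-- pv_equiv track=rewrite | github.com/robece/word-markdown-converter | source/scripts/split.py | _truncate_slug_preserving_words
-- ===== SOURCE A (Python) =====
-- def _truncate_slug_preserving_words(slug: str, max_len: int = 25) -> str:
--     """Truncate a slug while preserving meaningful words."""
--     parts = [p for p in slug.split("-") if len(p) > 3]
--     if not parts:
--         return slug[:max_len].rstrip("-")
--
--     cleaned = "-".join(parts)
--     if len(cleaned) <= max_len:
--         return cleaned
--
--     kept = []
--     current_len = 0
--     for part in parts:
--         extra = len(part) if not kept else len(part) + 1
--         if current_len + extra <= max_len:
--             kept.append(part)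
--             current_len += extra
--         else:
--             break
--
--     if not kept:
--         return cleaned[:max_len].rstrip("-")
--
--     return "-".join(kept)
-- ===== SOURCE B (Python) =====
-- def _truncate_slug_preserving_words(slug: str, max_len: int = 25) -> str:
--     """Truncate a slug while preserving meaningful words."""
--     parts = [p for p in slug.split("-") if len(p) > 3]
--     if not parts:
--         return slug[:max_len].rstrip("-")
--
--     cleaned = "-".join(parts)
--     if len(cleaned) <= max_len:
--         return cleaned
--
--     # Work on the joined string itself: cut at the last separator that still
--     # fits the budget (every separator in cleaned sits between two whole words).
--     cut = cleaned.rfind("-", 0, max_len + 1)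
--     if cut < 0:
--         return cleaned[:max_len].rstrip("-")
--     return cleaned[:cut]
-- ===== Notes on version B (the rewrite author's own statement) =====
-- stated objective: alternative
-- what changed: Instead of A's per-word greedy loop with a running length accumulator and break, B never iterates over the words at all: it searches the already-joined string for the last dash separator within the first max_len+1 characters (str.rfind) and slices the string there, relying on the fact that every dash in the joined string separates whole kept words.
-- outside the precondition, e.g. on _truncate_slug_preserving_words('hello-world', -2): A returns 'hello-wor', B returns 'hello'
import Mathlib
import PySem

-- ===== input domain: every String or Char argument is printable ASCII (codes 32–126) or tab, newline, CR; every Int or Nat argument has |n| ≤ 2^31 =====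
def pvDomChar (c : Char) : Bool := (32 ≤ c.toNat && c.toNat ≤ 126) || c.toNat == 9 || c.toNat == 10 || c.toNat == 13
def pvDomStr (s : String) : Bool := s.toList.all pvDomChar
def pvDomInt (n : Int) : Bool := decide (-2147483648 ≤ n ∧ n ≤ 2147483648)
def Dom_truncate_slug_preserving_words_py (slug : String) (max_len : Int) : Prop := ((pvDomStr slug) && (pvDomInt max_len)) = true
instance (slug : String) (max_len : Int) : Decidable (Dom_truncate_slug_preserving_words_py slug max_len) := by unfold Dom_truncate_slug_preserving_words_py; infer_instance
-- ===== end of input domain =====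

-- B drops A's per-word greedy accumulator loop entirely: it cuts the joined string at the
-- last dash found (str.rfind) within the first max_len+1 characters (alternative algorithm,
-- same cost); return values are proved equal for non-negative max_len.

-- shared helpers: both Pythons literally compute these same first steps
-- s.rstrip("-") ported by hand (exact): drop trailing '-' characters
def pyRstripDash (s : String) : String :=
  String.ofList ((s.toList.reverse.dropWhile (fun c => c == '-')).reverse)

-- [p for p in slug.split("-") if len(p) > 3]  (split? is always some: the separator "-" ≠ "")
def pyParts (slug : String) : List String :=
  ((PySem.Str.split? slug "-").getD []).filter (fun p => 3 < PySem.Str.len p)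

-- ===== PORT A =====
-- the for-loop over parts with kept / current_len and break
def keepLoopA (maxLen : Int) : List String → List String → Int → List String
  | [], kept, _ => kept
  | p :: rest, kept, curLen =>
    if curLen + (if kept.isEmpty then PySem.Str.len p else PySem.Str.len p + 1) ≤ maxLen then
      keepLoopA maxLen rest (kept ++ [p])
        (curLen + (if kept.isEmpty then PySem.Str.len p else PySem.Str.len p + 1))
    else kept

def truncate_slug_preserving_words_py (slug : String) (max_len : Int) : String :=
  let parts := pyParts slug
  if parts.isEmpty then pyRstripDash (PySem.Str.slice slug none (some max_len))
  else
    let cleaned := PySem.Str.join "-" parts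
    if PySem.Str.len cleaned ≤ max_len then cleaned
    else
      let kept := keepLoopA max_len parts [] 0
      if kept.isEmpty then pyRstripDash (PySem.Str.slice cleaned none (some max_len))
      else PySem.Str.join "-" kept

-- ===== PORT B =====
-- cut = cleaned.rfind("-", 0, max_len + 1); then slice before the separator found
def truncate_slug_preserving_words_py_alt (slug : String) (max_len : Int) : String :=
  let parts := pyParts slug
  if parts.isEmpty then pyRstripDash (PySem.Str.slice slug none (some max_len))
  else
    let cleaned := PySem.Str.join "-" parts
    if PySem.Str.len cleaned ≤ max_len then cleaned
    else
      let cut := PySem.Str.rfindFrom cleaned "-" 0 (some (max_len + 1))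
      if cut < 0 then pyRstripDash (PySem.Str.slice cleaned none (some max_len))
      else PySem.Str.slice cleaned none (some cut)

-- ===== PRECONDITION & SPEC =====
-- Pre_ excludes negative max_len: a length budget is naturally non-negative, and for
-- max_len < 0 A's value hinges on Python's negative-slice/rfind wraparound, which is
-- outside the task's natural domain; B does the natural thing there.
def Pre_truncate_slug_preserving_words_py (slug : String) (max_len : Int) : Prop := 0 ≤ max_len
instance (slug : String) (max_len : Int) : Decidable (Pre_truncate_slug_preserving_words_py slug max_len) := by unfold Pre_truncate_slug_preserving_words_py; infer_instance

def pvWitness_truncate_slug_preserving_words_py : String × Int := ("hello-world-markdown-converter", 14)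

def Spec_truncate_slug_preserving_words_py (slug : String) (max_len : Int) (out : String) : Prop := out = truncate_slug_preserving_words_py_alt slug max_len
instance (slug : String) (max_len : Int) (out : String) : Decidable (Spec_truncate_slug_preserving_words_py slug max_len out) := by unfold Spec_truncate_slug_preserving_words_py; infer_instance

-- ===== CLAIM (what is proved, stated in full; the proofs are below) =====
def Claim_equal_truncate_slug_preserving_words_py : Prop := ∀ (slug : String) (max_len : Int), Dom_truncate_slug_preserving_words_py slug max_len → Pre_truncate_slug_preserving_words_py slug max_len → Spec_truncate_slug_preserving_words_py slug max_len (truncate_slug_preserving_words_py slug max_len)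

-- ===== LEMMAS AND PROOFS =====

-- ---- proof-side view of A's greedy loop: cumulative sums and a count ----
def cumF (c : Int) : List String → List Int
  | [] => []
  | p :: rest => (c + PySem.Str.len p + 1) :: cumF (c + PySem.Str.len p + 1) rest

def countLoopB (maxLen : Int) : List Int → Nat
  | [] => 0
  | c :: rest => if c ≤ maxLen then countLoopB maxLen rest + 1 else 0

theorem keepLoopA_eq (maxLen : Int) (rest : List String) (kept : List String) (c : Int)
    (h : kept ≠ []) :
    keepLoopA maxLen rest kept c = kept ++ rest.take (countLoopB maxLen (cumF c rest)) := by
  induction rest generalizing kept c with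
  | nil => simp [keepLoopA]
  | cons p r ih =>
    have he : kept.isEmpty = false := by simpa [List.isEmpty_iff] using h
    simp only [keepLoopA, cumF, countLoopB, he, Bool.false_eq_true, if_false]
    rw [show c + (PySem.Str.len p + 1) = c + PySem.Str.len p + 1 from by ring]
    by_cases hc : c + PySem.Str.len p + 1 ≤ maxLen
    · rw [if_pos hc, if_pos hc, ih _ _ (by simp), List.take_succ_cons]
      simp
    · rw [if_neg hc, if_neg hc, List.take_zero, List.append_nil]

theorem keepLoopA_start (maxLen : Int) (p : String) (ps : List String) :
    keepLoopA maxLen (p :: ps) [] 0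
      = (p :: ps).take (countLoopB maxLen (cumF (-1) (p :: ps))) := by
  simp only [keepLoopA, cumF, countLoopB, List.isEmpty_nil, if_true]
  rw [show (0 : Int) + PySem.Str.len p = -1 + PySem.Str.len p + 1 from by ring]
  by_cases hc : (-1 : Int) + PySem.Str.len p + 1 ≤ maxLen
  · rw [if_pos hc, if_pos hc, keepLoopA_eq _ _ _ _ (by simp), List.take_succ_cons]
    simp
  · rw [if_neg hc, if_neg hc, List.take_zero]

-- ---- the joined string and the cumulative word-boundary positions ----
def J (ps : List (List Char)) : List Char := PySem.Chars.join ['-'] ps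

def cumAt (ps : List (List Char)) (k : Nat) : Nat := (J (ps.take k)).length

theorem J_cons (p : List Char) (ps : List (List Char)) (h : ps ≠ []) :
    J (p :: ps) = p ++ '-' :: J ps := by
  cases ps with
  | nil => exact absurd rfl h
  | cons b l => simp [J, PySem.Chars.join_cons_cons]

theorem J_split (parts : List (List Char)) (k : Nat) (h1 : 1 ≤ k) (h2 : k < parts.length) :
    J parts = J (parts.take k) ++ '-' :: J (parts.drop k) := by
  induction k generalizing parts with
  | zero => omega
  | succ k ih =>
    cases parts with
    | nil => simp at h2
    | cons p ps =>
      have hlen : (p :: ps).length = ps.length + 1 := by simp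
      have hps : ps ≠ [] := List.ne_nil_of_length_pos (by omega)
      rcases Nat.eq_or_lt_of_le h1 with h | h
      · have hk : k = 0 := by omega
        subst hk
        rw [List.take_succ_cons, List.drop_succ_cons, List.take_zero, J_cons p ps hps]
        simp [J, PySem.Chars.join_singleton]
      · have hk1 : 1 ≤ k := by omega
        have hlt : k < ps.length := by omega
        have htk : ps.take k ≠ [] := by
          apply List.ne_nil_of_length_pos
          rw [List.length_take]; omega
        rw [List.take_succ_cons, List.drop_succ_cons, J_cons p ps hps, ih ps hk1 hlt,
          J_cons p _ htk]
        simp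

theorem cumAt_one (p : List Char) (ps : List (List Char)) : cumAt (p :: ps) 1 = p.length := by
  simp [cumAt, J, PySem.Chars.join_singleton]

theorem cumAt_cons (p : List Char) (ps : List (List Char)) (k : Nat) (h1 : 1 ≤ k)
    (hps : ps ≠ []) : cumAt (p :: ps) (k + 1) = p.length + 1 + cumAt ps k := by
  have hpos : 0 < ps.length := List.length_pos_iff.mpr hps
  have htk : ps.take k ≠ [] := by
    apply List.ne_nil_of_length_pos
    rw [List.length_take]; omega
  rw [cumAt, List.take_succ_cons, J_cons p _ htk]
  simp [cumAt]
  omega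

theorem cumAt_succ_lt (parts : List (List Char)) (k : Nat) (h1 : 1 ≤ k) (h2 : k < parts.length) :
    cumAt parts k < cumAt parts (k + 1) := by
  have hlt : k < (parts.take (k+1)).length := by
    rw [List.length_take]; omega
  have := J_split (parts.take (k+1)) k (by omega) hlt
  have hlen : (J (parts.take (k+1))).length = (J ((parts.take (k+1)).take k)).length + 1 + (J ((parts.take (k+1)).drop k)).length := by
    rw [this]; simp; omega
  rw [List.take_take] at hlen
  simp [cumAt] at hlen ⊢
  omega

theorem cumAt_mono (parts : List (List Char)) (j j' : Nat) (h1 : 1 ≤ j) (hj : j < j')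
    (h2 : j' ≤ parts.length) : cumAt parts j < cumAt parts j' := by
  induction j' with
  | zero => omega
  | succ j' ih =>
    rcases Nat.eq_or_lt_of_le (Nat.succ_le_of_lt hj) with h | h
    · rw [← h] at *
      exact cumAt_succ_lt parts j h1 (by omega)
    · exact lt_trans (ih (by omega) (by omega)) (cumAt_succ_lt parts j' (by omega) (by omega))

theorem take_J (parts : List (List Char)) (k : Nat) (h1 : 1 ≤ k) (h2 : k < parts.length) :
    (J parts).take (cumAt parts k) = J (parts.take k) := by
  rw [J_split parts k h1 h2, cumAt]
  exact List.take_left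

theorem prefix_single (c : Char) (l : List Char) :
    [c].isPrefixOf l = true ↔ l[0]? = some c := by
  rw [List.isPrefixOf_iff_prefix]
  cases l with
  | nil => simp
  | cons a t => simp [List.cons_prefix_iff, eq_comm]

theorem dash_iff (parts : List (List Char)) (hfree : ∀ p ∈ parts, '-' ∉ p) (i : Nat) :
    (J parts)[i]? = some '-' ↔ ∃ k, 1 ≤ k ∧ k < parts.length ∧ i = cumAt parts k := by
  induction parts generalizing i with
  | nil =>
    constructor
    · intro h; simp [J, PySem.Chars.join, List.intercalate] at h
    · rintro ⟨k, h1, h2, -⟩; simp at h2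
  | cons p ps ih =>
    by_cases hps : ps = []
    · subst hps
      constructor
      · intro h
        have hmem : '-' ∈ p := by
          have : J [p] = p := by simp [J, PySem.Chars.join_singleton]
          rw [this] at h
          exact List.mem_of_getElem? h
        exact absurd hmem (hfree p (by simp))
      · rintro ⟨k, h1, h2, -⟩; simp at h2; omega
    · have hfree' : ∀ q ∈ ps, '-' ∉ q := fun q hq => hfree q (by simp [hq])
      have hJ : J (p :: ps) = p ++ '-' :: J ps := J_cons p ps hps
      have hpos : 0 < ps.length := List.length_pos_iff.mpr hps
      rw [hJ]
      rcases Nat.lt_trichotomy i p.length with hi | hi | hi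
      · -- inside p: no dash
        rw [List.getElem?_append_left hi]
        constructor
        · intro h
          exact absurd (List.mem_of_getElem? h) (hfree p (by simp))
        · rintro ⟨k, h1, h2, rfl⟩
          exfalso
          rcases Nat.eq_or_lt_of_le h1 with hk | hk
          · rw [← hk, cumAt_one] at hi; omega
          · obtain ⟨k', rfl⟩ : ∃ k', k = k' + 1 := ⟨k - 1, by omega⟩
            rw [cumAt_cons p ps k' (by omega) hps] at hi
            omega
      · -- exactly the separator
        subst hi
        rw [List.getElem?_append_right (le_refl _)]
        simp only [Nat.sub_self]
        constructor
        · intro _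
          exact ⟨1, le_refl _, by simp; omega, (cumAt_one p ps).symm⟩
        · intro _; simp
      · -- beyond p: shift into J ps
        rw [List.getElem?_append_right (by omega)]
        obtain ⟨j, hj⟩ : ∃ j, i - p.length = j + 1 := ⟨i - p.length - 1, by omega⟩
        rw [hj]
        simp only [List.getElem?_cons_succ]
        rw [ih hfree' j]
        constructor
        · rintro ⟨k, h1, h2, rfl⟩
          refine ⟨k + 1, by omega, by simp; omega, ?_⟩
          rw [cumAt_cons p ps k h1 hps]; omega
        · rintro ⟨k, h1, h2, hk⟩
          rcases Nat.eq_or_lt_of_le h1 with hke | hke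
          · rw [← hke, cumAt_one] at hk; omega
          · obtain ⟨k', rfl⟩ : ∃ k', k = k' + 1 := ⟨k - 1, by omega⟩
            rw [cumAt_cons p ps k' (by omega) hps] at hk
            exact ⟨k', by omega, by simp at h2; omega, by omega⟩

theorem cumF_shift (l : List String) (c d : Int) :
    cumF (c + d) l = (cumF c l).map (· + d) := by
  induction l generalizing c with
  | nil => simp [cumF]
  | cons p r ih =>
    simp only [cumF, List.map_cons]
    refine List.cons_eq_cons.mpr ⟨by ring, ?_⟩
    rw [show c + d + PySem.Str.len p + 1 = (c + PySem.Str.len p + 1) + d from by ring]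
    exact ih _

theorem count_shift (m a : Int) (l : List Int) :
    countLoopB m (l.map (· + a)) = countLoopB (m - a) l := by
  induction l with
  | nil => simp [countLoopB]
  | cons x r ih =>
    simp only [List.map_cons, countLoopB, ih]
    by_cases h : x + a ≤ m
    · rw [if_pos h, if_pos (by omega)]
    · rw [if_neg h, if_neg (by omega)]

theorem strlen_eq (p : String) : PySem.Str.len p = (p.toList.length : Int) := by
  simp [PySem.Str.len_eq]

theorem count_spec (parts : List String) (m : Int) :
    countLoopB m (cumF (-1) parts) ≤ parts.length ∧
    (∀ j, 1 ≤ j → j ≤ countLoopB m (cumF (-1) parts) →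
      (cumAt (parts.map String.toList) j : Int) ≤ m) ∧
    (countLoopB m (cumF (-1) parts) < parts.length →
      m < (cumAt (parts.map String.toList) (countLoopB m (cumF (-1) parts) + 1) : Int)) := by
  induction parts generalizing m with
  | nil =>
    refine ⟨by simp [cumF, countLoopB], fun j h1 h2 => by simp [cumF, countLoopB] at h2; omega, ?_⟩
    simp [cumF, countLoopB]
  | cons p ps ih =>
    have hL : PySem.Str.len p = (p.toList.length : Int) := strlen_eq p
    have hcf : cumF (-1) (p :: ps) = PySem.Str.len p :: (cumF (-1) ps).map (· + (PySem.Str.len p + 1)) := by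
      simp only [cumF]
      refine List.cons_eq_cons.mpr ⟨by ring, ?_⟩
      rw [show (-1 : Int) + PySem.Str.len p + 1 = (-1) + (PySem.Str.len p + 1) from by ring]
      exact cumF_shift ps (-1) (PySem.Str.len p + 1)
    rw [hcf]
    by_cases hc : PySem.Str.len p ≤ m
    · have hcount : countLoopB m (PySem.Str.len p :: (cumF (-1) ps).map (· + (PySem.Str.len p + 1)))
          = countLoopB (m - (PySem.Str.len p + 1)) (cumF (-1) ps) + 1 := by
        simp only [countLoopB, if_pos hc, count_shift]
      rw [hcount]
      obtain ⟨ihk, ihle, ihgt⟩ := ih (m - (PySem.Str.len p + 1))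
      set k' := countLoopB (m - (PySem.Str.len p + 1)) (cumF (-1) ps) with hk'
      refine ⟨by simp; omega, ?_, ?_⟩
      · intro j h1 h2
        rcases Nat.eq_or_lt_of_le h1 with hj | hj
        · rw [← hj, List.map_cons, cumAt_one]; omega
        · obtain ⟨j', rfl⟩ : ∃ j', j = j' + 1 := ⟨j - 1, by omega⟩
          have hj1 : 1 ≤ j' := by omega
          have hj2 : j' ≤ k' := by omega
          have hpsne : ps ≠ [] := by
            apply List.ne_nil_of_length_pos
            omega
          have hps' : ps.map String.toList ≠ [] := by simp [hpsne]
          rw [List.map_cons, cumAt_cons _ _ j' hj1 hps']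
          have := ihle j' hj1 hj2
          push_cast at this ⊢
          simp at this ⊢
          omega
      · intro hlt
        have hlt' : k' < ps.length := by simp at hlt; omega
        have hpsne : ps ≠ [] := List.ne_nil_of_length_pos (by omega)
        have hps' : ps.map String.toList ≠ [] := by simp [hpsne]
        rw [List.map_cons, cumAt_cons _ _ (k' + 1) (by omega) hps']
        have := ihgt hlt'
        push_cast at this ⊢
        omega
    · have hcount : countLoopB m (PySem.Str.len p :: (cumF (-1) ps).map (· + (PySem.Str.len p + 1))) = 0 := by
        simp only [countLoopB, if_neg hc]
      rw [hcount]
      refine ⟨by simp, fun j h1 h2 => by omega, ?_⟩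
      intro _
      rw [List.map_cons, cumAt_one]
      omega

theorem go_none (s sub : List Char) (j : Nat)
    (h : ∀ i ≤ j, sub.isPrefixOf (s.drop i) = false) :
    PySem.Chars.rfind.go s sub j = -1 := by
  induction j with
  | zero =>
    rw [PySem.Chars.rfind.go]
    have := h 0 (le_refl _)
    simp at this
    simp [this]
  | succ j ih =>
    rw [PySem.Chars.rfind.go]
    rw [h (j + 1) (le_refl _), ih (fun i hi => h i (by omega))]
    simp

theorem go_some (s sub : List Char) (j i : Nat) (hi : i ≤ j)
    (hp : sub.isPrefixOf (s.drop i) = true)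
    (hmax : ∀ i', i < i' → i' ≤ j → sub.isPrefixOf (s.drop i') = false) :
    PySem.Chars.rfind.go s sub j = (i : Int) := by
  induction j with
  | zero =>
    have hi0 : i = 0 := by omega
    subst hi0
    rw [PySem.Chars.rfind.go]
    simp at hp
    simp [hp]
  | succ j ih =>
    rw [PySem.Chars.rfind.go]
    rcases Nat.eq_or_lt_of_le hi with he | hlt
    · subst he
      rw [hp]
      simp
    · rw [hmax (j + 1) (by omega) (le_refl _)]
      simp
      exact ih (by omega) (fun i' h1 h2 => hmax i' h1 (by omega))

theorem dash_window (s : List Char) (E i : Nat) (c : Char) :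
    [c].isPrefixOf ((s.take E).drop i) = true ↔ (i < E ∧ s[i]? = some c) := by
  rw [prefix_single]
  rw [List.getElem?_drop]
  rcases Nat.lt_or_ge i E with h | h
  · rw [List.getElem?_take_of_lt (by omega)]
    simp [h]
  · rw [List.getElem?_eq_none (by rw [List.length_take]; omega)]
    simp
    omega

theorem rfindFrom_window (s : List Char) (m : Int) (h0 : 0 ≤ m) :
    PySem.Chars.rfindFrom s ['-'] 0 (some (m + 1))
      = PySem.Chars.rfind (s.take (min s.length (m + 1).toNat)) ['-'] := by
  rw [PySem.Chars.rfindFrom]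
  simp only [if_neg (lt_irrefl (0 : Int)), Int.toNat_zero, List.drop_zero, zero_add,
    if_neg (show ¬ (m + 1 < 0) from by omega)]
  have hE0 : ¬ ((if (s.length : Int) < m + 1 then (s.length : Int) else m + 1) < 0) := by
    split <;> omega
  have hE : (if (s.length : Int) < m + 1 then (s.length : Int) else m + 1).toNat
      = min s.length (m + 1).toNat := by
    split <;> omega
  rw [if_neg hE0, hE]
  split <;> omega

theorem splitOn_go_dashfree (fuel : Nat) (l cur : List Char) (acc : List (List Char))
    (hf : l.length < fuel) (hc : '-' ∉ cur) (ha : ∀ a ∈ acc, '-' ∉ a) :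
    ∀ piece ∈ PySem.Chars.splitOn.go ['-'] fuel l cur acc, '-' ∉ piece := by
  induction fuel generalizing l cur acc with
  | zero => omega
  | succ fuel ih =>
    cases l with
    | nil =>
      rw [PySem.Chars.splitOn.go]
      · intro piece hp
        simp at hp
        rcases hp with h | h
        · exact ha piece h
        · subst h; simpa using hc
      · omega
    | cons c rest =>
      rw [PySem.Chars.splitOn.go]
      by_cases hpre : (['-'] : List Char).isPrefixOf (c :: rest) = true
      · rw [if_pos hpre]
        have hlen : (List.drop (['-'] : List Char).length (c :: rest)).length < fuel := by
          simp at hf ⊢; omega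
        refine ih _ _ _ hlen (by simp) ?_
        intro a hamem
        simp at hamem
        rcases hamem with h | h
        · subst h; simpa using hc
        · exact ha a h
      · rw [if_neg hpre]
        have hcne : c ≠ '-' := by
          intro heq; subst heq
          simp [List.isPrefixOf] at hpre
        refine ih _ _ _ (by simp at hf ⊢; omega) ?_ ha
        intro hmem
        simp at hmem
        rcases hmem with h | h
        · exact hcne h.symm
        · exact hc h

theorem splitOn_dashfree (s : List Char) :
    ∀ piece ∈ PySem.Chars.splitOn s ['-'], '-' ∉ piece := by
  rw [PySem.Chars.splitOn]
  exact splitOn_go_dashfree (s.length + 1) s [] [] (by omega) (by simp) (by simp)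


theorem pyParts_dashfree (slug : String) : ∀ q ∈ pyParts slug, '-' ∉ q.toList := by
  intro q hq
  unfold pyParts at hq
  have hmap := PySem.Str.split?_map slug "-"
  have hsep : PySem.Chars.split? slug.toList "-".toList
      = some (PySem.Chars.splitOn slug.toList "-".toList) := by
    rw [PySem.Chars.split?]
    simp [show "-".toList = ['-'] from by decide]
  rw [hsep] at hmap
  cases hsp : PySem.Str.split? slug "-" with
  | none => rw [hsp] at hmap; simp at hmap
  | some l =>
    rw [hsp] at hmap
    simp only [Option.map_some, Option.some.injEq] at hmap
    rw [hsp] at hq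
    simp only [Option.getD_some] at hq
    have hql : q ∈ l := List.mem_of_mem_filter hq
    have hmem : q.toList ∈ l.map String.toList := List.mem_map_of_mem hql
    rw [hmap] at hmem
    have := splitOn_dashfree slug.toList
    rw [show "-".toList = ['-'] from by decide] at hmem
    exact this q.toList hmem

-- ---- the long-slug branch: A's greedy join equals B's rfind cut ----
theorem tail_eq (p0 : String) (ps0 : List String)
    (hfree : ∀ q ∈ (p0 :: ps0), '-' ∉ q.toList)
    (m : Int) (h0 : 0 ≤ m)
    (hlong : ¬ PySem.Str.len (PySem.Str.join "-" (p0 :: ps0)) ≤ m) :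
    (if (keepLoopA m (p0 :: ps0) [] 0).isEmpty then
        pyRstripDash (PySem.Str.slice (PySem.Str.join "-" (p0 :: ps0)) none (some m))
      else PySem.Str.join "-" (keepLoopA m (p0 :: ps0) [] 0))
    = (if PySem.Str.rfindFrom (PySem.Str.join "-" (p0 :: ps0)) "-" 0 (some (m + 1)) < 0 then
        pyRstripDash (PySem.Str.slice (PySem.Str.join "-" (p0 :: ps0)) none (some m))
      else PySem.Str.slice (PySem.Str.join "-" (p0 :: ps0)) none
        (some (PySem.Str.rfindFrom (PySem.Str.join "-" (p0 :: ps0)) "-" 0 (some (m + 1))))) := by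
  set parts := p0 :: ps0 with hparts
  have hlp : 1 ≤ parts.length := by rw [hparts]; simp
  have hjoin : (PySem.Str.join "-" parts).toList = J (parts.map String.toList) := by
    rw [PySem.Str.toList_join, show "-".toList = ['-'] from by decide]; rfl
  have hlenparts : (parts.map String.toList).length = parts.length := by simp
  have hfreeL : ∀ pL ∈ parts.map String.toList, '-' ∉ pL := by
    intro pL hpL
    simp only [List.mem_map] at hpL
    obtain ⟨q, hq, rfl⟩ := hpL
    exact hfree q hq
  have hn : PySem.Str.len (PySem.Str.join "-" parts) = ((J (parts.map String.toList)).length : Int) := by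
    rw [strlen_eq, hjoin]
  have hm : m < ((J (parts.map String.toList)).length : Int) := by omega
  obtain ⟨k1, k2, k3⟩ := count_spec parts m
  have hkept : keepLoopA m parts [] 0 = parts.take (countLoopB m (cumF (-1) parts)) :=
    keepLoopA_start m p0 ps0
  set k := countLoopB m (cumF (-1) parts) with hk
  set s := J (parts.map String.toList) with hs
  have hcum_all : cumAt (parts.map String.toList) parts.length = s.length := by
    rw [← hlenparts, cumAt, List.take_length]
  have hklt : k < parts.length := by
    rcases Nat.lt_or_ge k parts.length with h | h
    · exact h
    · exfalso
      have hke : k = parts.length := by omega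
      have h2 := k2 k (by omega) (le_refl _)
      rw [hke, hcum_all] at h2
      omega
  have hcut : PySem.Str.rfindFrom (PySem.Str.join "-" parts) "-" 0 (some (m + 1))
      = PySem.Chars.rfind (s.take (min s.length (m + 1).toNat)) ['-'] := by
    rw [PySem.Str.rfindFrom_eq, hjoin, show "-".toList = ['-'] from by decide]
    exact rfindFrom_window s m h0
  set E := min s.length (m + 1).toNat with hE
  have hEle : (E : Int) ≤ m + 1 := by
    have : E ≤ (m + 1).toNat := Nat.min_le_right _ _
    omega
  have hsl : (s.take E).length = E := by
    rw [List.length_take]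
    have : E ≤ s.length := Nat.min_le_left _ _
    omega
  rw [hkept, hcut]
  rcases Nat.eq_zero_or_pos k with hk0 | hkpos
  · -- nothing fits: both sides take the rstrip fallback
    have h3 : m < (cumAt (parts.map String.toList) 1 : Int) := by
      have := k3 hklt
      rw [hk0] at this
      simpa using this
    have hdash0 : ∀ i ≤ E, (['-'] : List Char).isPrefixOf ((s.take E).drop i) = false := by
      intro i hi
      rcases Bool.eq_false_or_eq_true ((['-'] : List Char).isPrefixOf ((s.take E).drop i)) with h | h
      swap
      · exact h
      · exfalso
        rw [dash_window] at h
        obtain ⟨hiE, hdash⟩ := h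
        rw [hs, dash_iff (parts.map String.toList) hfreeL] at hdash
        obtain ⟨kk, hkk1, hkk2, rfl⟩ := hdash
        have hmono : cumAt (parts.map String.toList) 1 ≤ cumAt (parts.map String.toList) kk := by
          rcases Nat.eq_or_lt_of_le hkk1 with he | hlt
          · rw [he]
          · exact le_of_lt (cumAt_mono _ 1 kk (le_refl _) hlt (by omega))
        omega
    have hrf : PySem.Chars.rfind (s.take E) ['-'] = -1 := by
      rw [PySem.Chars.rfind, hsl]
      exact go_none _ _ E hdash0
    rw [hk0, hrf]
    simp
  · -- k words fit: A joins them, B slices at the k-th boundary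
    have hk1 : 1 ≤ k := hkpos
    have hkltL : k < (parts.map String.toList).length := by omega
    have hdash : s[cumAt (parts.map String.toList) k]? = some '-' := by
      rw [hs, dash_iff (parts.map String.toList) hfreeL]
      exact ⟨k, hk1, hkltL, rfl⟩
    have hin : cumAt (parts.map String.toList) k < s.length := by
      rcases Nat.lt_or_ge (cumAt (parts.map String.toList) k) s.length with h | h
      · exact h
      · rw [List.getElem?_eq_none h] at hdash; simp at hdash
    have him : (cumAt (parts.map String.toList) k : Int) ≤ m := k2 k hk1 (le_refl _)
    have hiE : cumAt (parts.map String.toList) k < E := by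
      have : (m + 1).toNat = m + 1 := by omega
      omega
    have h3 := k3 hklt
    have hmax : ∀ i', cumAt (parts.map String.toList) k < i' → i' ≤ E →
        (['-'] : List Char).isPrefixOf ((s.take E).drop i') = false := by
      intro i' hgt hle
      rcases Bool.eq_false_or_eq_true ((['-'] : List Char).isPrefixOf ((s.take E).drop i')) with h | h
      swap
      · exact h
      · exfalso
        rw [dash_window] at h
        obtain ⟨hi'E, hd⟩ := h
        rw [hs, dash_iff (parts.map String.toList) hfreeL] at hd
        obtain ⟨j', hj1, hj2, rfl⟩ := hd
        have hkL : k ≤ (parts.map String.toList).length := by omega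
        have hj'g : k < j' := by
          rcases Nat.lt_trichotomy j' k with hlt | he | hgt2
          · have := cumAt_mono (parts.map String.toList) j' k hj1 hlt hkL
            omega
          · rw [he] at hgt; omega
          · exact hgt2
        have hmono : cumAt (parts.map String.toList) (k + 1) ≤ cumAt (parts.map String.toList) j' := by
          rcases Nat.eq_or_lt_of_le (show k + 1 ≤ j' from hj'g) with he | hlt
          · rw [he]
          · exact le_of_lt (cumAt_mono _ (k + 1) j' (by omega) hlt (by omega))
        omega
    have hpref : (['-'] : List Char).isPrefixOf ((s.take E).drop (cumAt (parts.map String.toList) k)) = true :=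
      (dash_window s E _ '-').mpr ⟨hiE, hdash⟩
    have hrf : PySem.Chars.rfind (s.take E) ['-'] = (cumAt (parts.map String.toList) k : Int) := by
      rw [PySem.Chars.rfind, hsl]
      exact go_some _ _ E _ (le_of_lt hiE) hpref hmax
    rw [hrf]
    obtain ⟨k0, hke⟩ : ∃ k0, k = k0 + 1 := ⟨k - 1, by omega⟩
    have hne : (parts.take k).isEmpty = false := by
      rw [hke, hparts, List.take_succ_cons]; rfl
    rw [hne]
    simp only [Bool.false_eq_true, if_false]
    rw [if_neg (show ¬ ((cumAt (parts.map String.toList) k : Int) < 0) from by omega)]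
    apply String.toList_inj.mp
    rw [PySem.Str.toList_join, PySem.Str.toList_slice, show "-".toList = ['-'] from by decide,
      hjoin]
    have hslice : PySem.Chars.slice s none (some ((cumAt (parts.map String.toList) k : Nat) : Int))
        = s.take (cumAt (parts.map String.toList) k) := by
      rw [PySem.Chars.slice_eq_listSlice, PySem.List.slice_to _ (by positivity), Int.toNat_natCast]
    rw [hslice, hs, take_J (parts.map String.toList) k hk1 hkltL]
    simp [J, List.map_take]

-- ===== VERDICT (by name: the statement is the Claim_ definition above) =====
theorem truncate_slug_preserving_words_py_spec : Claim_equal_truncate_slug_preserving_words_py := by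
  intro slug max_len _ hpre
  unfold Spec_truncate_slug_preserving_words_py
  unfold truncate_slug_preserving_words_py truncate_slug_preserving_words_py_alt
  cases hp : pyParts slug with
  | nil => simp
  | cons p ps =>
    simp only [List.isEmpty_cons, Bool.false_eq_true, if_false]
    by_cases hlen : PySem.Str.len (PySem.Str.join "-" (p :: ps)) ≤ max_len
    · rw [if_pos hlen, if_pos hlen]
    · rw [if_neg hlen, if_neg hlen]
      have hfree : ∀ q ∈ (p :: ps), '-' ∉ q.toList := by
        rw [← hp]; exact pyParts_dashfree slug
      exact tail_eq p ps hfree max_len hpre hlen
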